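-- pv_equiv track=rewrite | github.com/Aasthaengg/IBMdataset | Python_codes/p03089/s091683484.py | dfs
-- ===== SOURCE A (Python) =====
-- def dfs(N, a, i, procedure):
--     if i == 0:
--         return procedure
--
--     for j in reversed(range(1, i+1)):
--         if a[j-1] == j:
--             l = a[:]
--             del l[j-1]
--             p = procedure[:]
--             p.append(j)
--             ret = dfs(N, l, i-1, p)
--             if ret is not None:
--                 return ret
--             break
-- ===== SOURCE B (Python) =====
-- def dfs(N, a, i, procedure):
--     # Iterative greedy: repeatedly remove, in place, the largest position j
--     # (within the first `cur` elements) whose value equals its 1-based index.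
--     if i < 0:
--         return None
--     lst = list(a)
--     out = list(procedure)
--     cur = i
--     while cur > 0:
--         j = 0
--         for k, v in enumerate(lst[:cur], 1):
--             if v == k:
--                 j = k
--         if j == 0:
--             return None
--         del lst[j - 1]
--         out.append(j)
--         cur -= 1
--     return out
-- ===== Notes on version B (the rewrite author's own statement) =====
-- stated objective: alternative
-- what changed: Replaces A's recursion with fresh list copies per level and a backward break-out scan by a single iterative while-loop that deletes in place from one working list, finding the match with a forward enumerate scan that keeps the last matching index.
import Mathlib
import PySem

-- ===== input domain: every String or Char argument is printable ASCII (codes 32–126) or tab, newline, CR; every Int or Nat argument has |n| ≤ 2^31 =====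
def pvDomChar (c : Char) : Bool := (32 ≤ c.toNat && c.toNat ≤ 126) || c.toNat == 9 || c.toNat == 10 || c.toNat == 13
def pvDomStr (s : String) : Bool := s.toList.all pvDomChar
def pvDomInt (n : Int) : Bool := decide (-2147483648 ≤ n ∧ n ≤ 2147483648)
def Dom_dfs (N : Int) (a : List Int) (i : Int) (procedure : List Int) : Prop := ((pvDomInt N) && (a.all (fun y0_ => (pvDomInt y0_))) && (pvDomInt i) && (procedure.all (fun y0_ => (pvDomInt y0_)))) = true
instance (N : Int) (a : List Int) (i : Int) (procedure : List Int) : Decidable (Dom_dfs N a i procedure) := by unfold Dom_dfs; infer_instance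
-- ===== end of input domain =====

-- B replaces A's recursion-with-list-copies by an iterative in-place greedy loop
-- that finds the last matching index by a single forward scan (objective: alternative;
-- return-value equivalence only — the Pythons do not mutate their arguments observably).


-- ===== PORT A =====
-- A's inner loop 'for j in reversed(range(1, i+1))' scanning j = J, J-1, …, 1; on the
-- first match it recurses on i-1 (the i = 0 base case of that recursive call is inlined
-- as 'if i - 1 = 0 then some p'); the 'break' means a None from the recursion is final.
-- 'del l[j-1]' is a.take (j-1) ++ a.drop j;  'p.append(j)' is procedure ++ [j].
def dfsAux (i j : Nat) (a procedure : List Int) : Option (List Int) :=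
  match j with
  | 0 => none                                   -- loop exhausted without a match
  | j' + 1 =>
    match PySem.List.pyGet? a ((j' : Int)) with -- a[j-1]  (none = IndexError, outside Pre_)
    | none => none
    | some v =>
      if v = ((j' : Int) + 1) then
        let l := a.take j' ++ a.drop (j' + 1)
        let p := procedure ++ [((j' : Int) + 1)]
        if h : i - 1 = 0 then some p else dfsAux (i - 1) (i - 1) l p
      else dfsAux i j' a procedure
termination_by (i, j)
decreasing_by
  · exact Prod.Lex.left _ _ (by omega)
  · exact Prod.Lex.right _ (by omega)

def dfs (N : Int) (a : List Int) (i : Int) (procedure : List Int) : Option (List Int) :=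
  if i = 0 then some procedure
  else if i < 0 then none                       -- range(1, i+1) is empty: falls off the loop
  else dfsAux i.toNat i.toNat a procedure

-- ===== PORT B =====
-- 'j = 0; for k, v in enumerate(lst[:cur], 1): if v == k: j = k'
def lastMatch (pref : List Int) : Int :=
  (PySem.List.enumerate pref 1).foldl (fun j kv => if kv.2 = kv.1 then kv.1 else j) 0

-- the while loop, on cur; 'del lst[j-1]' is take/drop, 'out.append(j)' is ++ [j]
def dfsAltLoop (lst out : List Int) (cur : Nat) : Option (List Int) :=
  match cur with
  | 0 => some out
  | c + 1 =>
    let j := lastMatch (lst.take (c + 1))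
    if j = 0 then none
    else dfsAltLoop (lst.take (j - 1).toNat ++ lst.drop j.toNat) (out ++ [j]) c

def dfs_alt (N : Int) (a : List Int) (i : Int) (procedure : List Int) : Option (List Int) :=
  if i < 0 then none
  else dfsAltLoop a procedure i.toNat

-- ===== PRECONDITION & SPEC =====
-- Pre_ excludes exactly the inputs where A raises IndexError: a positive i larger than len(a)
-- (the first loop access a[i-1] is then out of range).
def Pre_dfs (N : Int) (a : List Int) (i : Int) (procedure : List Int) : Prop :=
  1 ≤ i → i ≤ (a.length : Int)
instance (N : Int) (a : List Int) (i : Int) (procedure : List Int) : Decidable (Pre_dfs N a i procedure) := by unfold Pre_dfs; infer_instance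

def pvWitness_dfs : Int × List Int × Int × List Int := (3, [1, 2, 2], 3, [])

def Spec_dfs (N : Int) (a : List Int) (i : Int) (procedure : List Int) (out : Option (List Int)) : Prop := out = dfs_alt N a i procedure
instance (N : Int) (a : List Int) (i : Int) (procedure : List Int) (out : Option (List Int)) : Decidable (Spec_dfs N a i procedure out) := by unfold Spec_dfs; infer_instance

-- ===== CLAIM (what is proved, stated in full; the proofs are below) =====
def Claim_equal_dfs : Prop := ∀ (N : Int) (a : List Int) (i : Int) (procedure : List Int), Dom_dfs N a i procedure → Pre_dfs N a i procedure → Spec_dfs N a i procedure (dfs N a i procedure)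

-- ===== LEMMAS AND PROOFS =====

-- proof-side characterisation of both searches: the largest k ≤ j with a[k-1] = k (0 if none)
def lmU (a : List Int) : Nat → Nat
  | 0 => 0
  | j + 1 => if PySem.List.pyGet? a ((j : Int)) = some ((j : Int) + 1) then j + 1 else lmU a j

theorem lmU_le (a : List Int) (j : Nat) : lmU a j ≤ j := by
  induction j with
  | zero => simp [lmU]
  | succ j ih => unfold lmU; split <;> omega

theorem lastMatch_take (a : List Int) (n : Nat) (hn : n ≤ a.length) :
    lastMatch (a.take n) = ((lmU a n : Nat) : Int) := by
  induction n with
  | zero => simp [lastMatch, lmU, PySem.List.enumerate]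
  | succ n ih =>
    have hlt : n < a.length := by omega
    have htake : a.take (n + 1) = a.take n ++ [a[n]] := by
      rw [List.take_succ]; simp [List.getElem?_eq_getElem hlt]
    rw [lastMatch, htake, PySem.List.enumerate_append, List.foldl_append]
    have hlen : (a.take n).length = n := by simp; omega
    rw [hlen]
    simp only [PySem.List.enumerate, List.foldl_cons, List.foldl_nil]
    unfold lmU
    rw [PySem.List.pyGet?_natCast, List.getElem?_eq_getElem hlt]
    by_cases h : a[n] = ((n : Int) + 1)
    · simp [h, add_comm]
    · have h' : ¬ (a[n] = (1 : Int) + (n : Int)) := by rw [add_comm]; exact h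
      simp only [if_neg h, if_neg h', Option.some.injEq]
      rw [← lastMatch, ih (by omega)]

theorem dfsAux_succ (i j : Nat) (a p : List Int) (v : Int)
    (hv : PySem.List.pyGet? a ((j : Int)) = some v) :
    dfsAux i (j + 1) a p =
      (if v = ((j : Int) + 1) then
        (if h : i - 1 = 0 then some (p ++ [((j : Int) + 1)])
         else dfsAux (i - 1) (i - 1) (a.take j ++ a.drop (j + 1)) (p ++ [((j : Int) + 1)]))
       else dfsAux i j a p) := by
  rw [dfsAux, hv]

theorem dfsAux_eq (i j : Nat) (a p : List Int) (hj : j ≤ a.length) :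
    dfsAux i j a p =
      (if lmU a j = 0 then none
       else
         if i - 1 = 0 then some (p ++ [((lmU a j : Nat) : Int)])
         else dfsAux (i - 1) (i - 1)
           (a.take (lmU a j - 1) ++ a.drop (lmU a j)) (p ++ [((lmU a j : Nat) : Int)])) := by
  induction j with
  | zero => simp [dfsAux, lmU]
  | succ j ih =>
    have hlt : j < a.length := by omega
    have hget : PySem.List.pyGet? a ((j : Int)) = some a[j] := by
      rw [PySem.List.pyGet?_natCast, List.getElem?_eq_getElem hlt]
    rw [dfsAux_succ i j a p a[j] hget]
    have e : lmU a (j + 1) = if PySem.List.pyGet? a ((j : Int)) = some ((j : Int) + 1) then j + 1 else lmU a j := rfl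
    by_cases h : a[j] = ((j : Int) + 1)
    · have hl : lmU a (j + 1) = j + 1 := by
        rw [e, hget, if_pos (by rw [h])]
      rw [if_pos h, hl, if_neg (Nat.succ_ne_zero j)]
      have hc : (((j + 1 : Nat) : Nat) : Int) = (j : Int) + 1 := by push_cast; ring
      rw [hc]
      have hd : j + 1 - 1 = j := rfl
      rw [hd]
      simp only [dite_eq_ite]
    · have hl : lmU a (j + 1) = lmU a j := by
        rw [e, hget, if_neg (by simpa using h)]
      simp only [if_neg h, hl]
      exact ih (by omega)

theorem loop_eq (n : Nat) : ∀ (a p : List Int), 1 ≤ n → n ≤ a.length →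
    dfsAux n n a p = dfsAltLoop a p n := by
  induction n with
  | zero => intro a p h; omega
  | succ c ih =>
    intro a p _ hlen
    rw [dfsAux_eq (c + 1) (c + 1) a p hlen]
    rw [dfsAltLoop]
    rw [lastMatch_take a (c + 1) hlen]
    set m := lmU a (c + 1) with hm
    have hmle : m ≤ c + 1 := lmU_le a (c + 1)
    by_cases h0 : m = 0
    · simp [h0]
    · have hpos : 1 ≤ m := by omega
      have hInt0 : ¬ ((m : Int) = 0) := by exact_mod_cast h0
      rw [if_neg h0, if_neg hInt0]
      have h1 : ((m : Int) - 1).toNat = m - 1 := by omega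
      have h2 : ((m : Int)).toNat = m := by omega
      rw [h1, h2]
      by_cases hc : c = 0
      · subst hc; simp [dfsAltLoop]
      · have : c + 1 - 1 = c := by omega
        rw [this, if_neg hc]
        apply ih _ _ (by omega)
        have : (a.take (m - 1) ++ a.drop m).length = a.length - 1 := by
          simp; omega
        omega

-- ===== VERDICT (by name: the statement is the Claim_ definition above) =====
theorem dfs_spec : Claim_equal_dfs := by
  intro N a i procedure _ hpre
  unfold Spec_dfs dfs dfs_alt
  by_cases h0 : i = 0
  · subst h0; simp [dfsAltLoop]
  · rw [if_neg h0]
    by_cases hneg : i < 0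
    · rw [if_pos hneg, if_pos hneg]
    · rw [if_neg hneg, if_neg hneg]
      have hi1 : (1 : Int) ≤ i := by omega
      have hi2 : i ≤ (a.length : Int) := hpre hi1
      have h1 : 1 ≤ i.toNat := by omega
      have h2 : i.toNat ≤ a.length := by omega
      exact loop_eq i.toNat a procedure h1 h2
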